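-- pv_equiv track=rewrite | github.com/livcristi/Advent-Of-Code | AdventOfCode2024/Advent/Day9/day9.py | move_file_index
-- ===== SOURCE A (Python) =====
-- def move_file_index(fragmentation: list[int], file_index: int) -> list[int]:
--     file_length = fragmentation.count(file_index)
--     file_start = fragmentation.index(file_index)
--     frag_index = 0
--     while frag_index < len(fragmentation) and frag_index < file_start:
--         if fragmentation[frag_index] is None:
--             free_count = 1
--             end_free = frag_index
--             while (
--                 end_free + 1 < len(fragmentation)
--                 and fragmentation[end_free + 1] is None
--             ):
--                 end_free += 1
--                 free_count += 1
--             if free_count >= file_length: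
--                 for index in range(file_start, file_start + file_length):
--                     fragmentation[index] = None
--                 for index in range(frag_index, frag_index + file_length):
--                     fragmentation[index] = file_index
--                 return fragmentation
--             frag_index = end_free + 1
--         else:
--             frag_index += 1
--     return fragmentation
-- ===== SOURCE B (Python) =====
-- def move_file_index(fragmentation: list[int], file_index: int) -> list[int]:
--     file_length = fragmentation.count(file_index)
--     file_start = fragmentation.index(file_index)
--     run_count = 0
--     for index in range(file_start):
--         if fragmentation[index] is None:
--             run_count += 1
--             if run_count == file_length:
--                 start = index - file_length + 1
--                 fragmentation[file_start:file_start + file_length] = [None] * file_length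
--                 fragmentation[start:start + file_length] = [file_index] * file_length
--                 return fragmentation
--         else:
--             run_count = 0
--     return fragmentation
-- ===== Notes on version B (the rewrite author's own statement) =====
-- stated objective: simpler
-- what changed: Replaced A's nested run-by-run scan (inner while that measures each free run, outer loop that jumps over it) by one flat loop with a running counter of consecutive None cells, placing the file by slice assignment at index-file_length+1 when the counter reaches file_length.
import Mathlib
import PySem

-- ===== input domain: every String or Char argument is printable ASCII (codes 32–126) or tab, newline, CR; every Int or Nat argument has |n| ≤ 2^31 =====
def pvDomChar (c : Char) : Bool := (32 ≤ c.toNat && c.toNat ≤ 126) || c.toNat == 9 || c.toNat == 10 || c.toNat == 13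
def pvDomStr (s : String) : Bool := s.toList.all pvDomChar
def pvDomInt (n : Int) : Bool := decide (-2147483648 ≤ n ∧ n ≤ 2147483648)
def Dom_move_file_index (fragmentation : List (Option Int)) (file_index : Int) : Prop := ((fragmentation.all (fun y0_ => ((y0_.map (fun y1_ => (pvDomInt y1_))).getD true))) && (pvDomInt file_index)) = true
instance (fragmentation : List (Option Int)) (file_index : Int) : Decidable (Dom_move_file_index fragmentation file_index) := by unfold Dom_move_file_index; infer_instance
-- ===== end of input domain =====

-- B replaces A's nested run-by-run scan by one flat loop with a running counter of consecutive free cells (simpler);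
-- both Pythons mutate `fragmentation` in place identically — the equivalence proved here is about the return value.

-- ===== PORT A =====
-- inner `while end_free+1 < len(fragmentation) and fragmentation[end_free+1] is None`, carrying (end_free, free_count)
def pvInnerA (frag : List (Option Int)) (end_free : Nat) (free_count : Nat) : Nat × Nat :=
  if h : end_free + 1 < frag.length ∧ frag[end_free + 1]? = some none then
    pvInnerA frag (end_free + 1) (free_count + 1)
  else (end_free, free_count)
termination_by frag.length - end_free
decreasing_by omega

-- cited by pvOuterA's decreasing_by (the jump `frag_index = end_free + 1` advances)
theorem pvInnerA_fst_ge (frag : List (Option Int)) (end_free free_count : Nat) :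
    end_free ≤ (pvInnerA frag end_free free_count).1 := by
  rw [pvInnerA]
  split
  · exact le_trans (Nat.le_succ _) (pvInnerA_fst_ge frag (end_free + 1) (free_count + 1))
  · exact le_refl _
termination_by frag.length - end_free
decreasing_by omega

-- `for index in range(a, a+L): frag[index] = v` (every written index is in range whenever A's Python reaches this loop)
def pvSetRangeA (frag : List (Option Int)) (a : Nat) (L : Nat) (v : Option Int) : List (Option Int) :=
  (List.range L).foldl (fun f k => f.set (a + k) v) frag

-- outer `while frag_index < len(fragmentation) and frag_index < file_start` loop
def pvOuterA (frag : List (Option Int)) (file_index : Int) (file_start file_length : Nat) (frag_index : Nat) : List (Option Int) :=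
  if h : frag_index < frag.length ∧ frag_index < file_start then
    if frag[frag_index]? = some none then
      if file_length ≤ (pvInnerA frag frag_index 1).2 then
        pvSetRangeA (pvSetRangeA frag file_start file_length none) frag_index file_length (some file_index)
      else
        pvOuterA frag file_index file_start file_length ((pvInnerA frag frag_index 1).1 + 1)
    else
      pvOuterA frag file_index file_start file_length (frag_index + 1)
  else frag
termination_by file_start - frag_index
decreasing_by
  · have := pvInnerA_fst_ge frag frag_index 1; omega
  · omega

def move_file_index (fragmentation : List (Option Int)) (file_index : Int) : List (Option Int) :=
  let file_length := PySem.List.count fragmentation (some file_index)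
  match PySem.List.index? fragmentation (some file_index) with
  | some file_start => pvOuterA fragmentation file_index file_start file_length 0
  | none => fragmentation   -- Python's list.index raises ValueError here; excluded by Pre_

-- ===== PORT B =====
-- flat `for index in range(file_start)` loop with a running counter of consecutive None cells; the two Python
-- slice assignments are take/++/drop (exact: both slices are within the list whenever they execute)
def pvLoopB (frag : List (Option Int)) (file_index : Int) (file_start file_length : Nat) (index run_count : Nat) : List (Option Int) :=
  if h : index < file_start then
    if frag[index]? = some none then
      if run_count + 1 = file_length then
        (frag.take file_start ++ List.replicate file_length none ++ frag.drop (file_start + file_length)).take (index + 1 - file_length) ++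
          List.replicate file_length (some file_index) ++
          (frag.take file_start ++ List.replicate file_length none ++ frag.drop (file_start + file_length)).drop ((index + 1 - file_length) + file_length)
      else pvLoopB frag file_index file_start file_length (index + 1) (run_count + 1)
    else pvLoopB frag file_index file_start file_length (index + 1) 0
  else frag
termination_by file_start - index
decreasing_by all_goals omega

def move_file_index_alt (fragmentation : List (Option Int)) (file_index : Int) : List (Option Int) :=
  let file_length := PySem.List.count fragmentation (some file_index)
  match PySem.List.index? fragmentation (some file_index) with
  | some file_start => pvLoopB fragmentation file_index file_start file_length 0 0
  | none => fragmentation   -- Python's list.index raises ValueError here; excluded by Pre_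

-- ===== PRECONDITION & SPEC =====
-- A raises ValueError (fragmentation.index) exactly when file_index does not occur in fragmentation.
def Pre_move_file_index (fragmentation : List (Option Int)) (file_index : Int) : Prop :=
  (some file_index) ∈ fragmentation
instance (fragmentation : List (Option Int)) (file_index : Int) : Decidable (Pre_move_file_index fragmentation file_index) := by unfold Pre_move_file_index; infer_instance
def pvWitness_move_file_index : List (Option Int) × Int := ([none, none, some 7, some 7], 7)

def Spec_move_file_index (fragmentation : List (Option Int)) (file_index : Int) (out : List (Option Int)) : Prop := out = move_file_index_alt fragmentation file_index
instance (fragmentation : List (Option Int)) (file_index : Int) (out : List (Option Int)) : Decidable (Spec_move_file_index fragmentation file_index out) := by unfold Spec_move_file_index; infer_instance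

-- ===== CLAIM (what is proved, stated in full; the proofs are below) =====
def Claim_equal_move_file_index : Prop := ∀ (fragmentation : List (Option Int)) (file_index : Int), Dom_move_file_index fragmentation file_index → Pre_move_file_index fragmentation file_index → Spec_move_file_index fragmentation file_index (move_file_index fragmentation file_index)

-- ===== LEMMAS AND PROOFS =====

-- A's range-assignment loop preserves the length and writes pointwise
theorem pvSetRangeA_length (frag : List (Option Int)) (a L : Nat) (v : Option Int) :
    (pvSetRangeA frag a L v).length = frag.length := by
  induction L with
  | zero => rfl
  | succ n ih =>
    unfold pvSetRangeA at *
    rw [List.range_succ, List.foldl_append]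
    simp [ih]

theorem pvSetRangeA_getElem? (frag : List (Option Int)) (a L : Nat) (v : Option Int) (j : Nat) :
    (pvSetRangeA frag a L v)[j]? = if a ≤ j ∧ j < a + L then frag[j]?.map (fun _ => v) else frag[j]? := by
  induction L with
  | zero => simp [pvSetRangeA]
  | succ n ih =>
    unfold pvSetRangeA at *
    rw [List.range_succ, List.foldl_append]
    simp only [List.foldl_cons, List.foldl_nil, List.getElem?_set, ih]
    by_cases h1 : a + n = j
    · by_cases h2 : a ≤ j ∧ j < a + n
      · simp [h1, h2]; omega
      · simp [h1]
        have : a ≤ j ∧ j < a + (n+1) := by omega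
        simp only [this, and_self, if_pos]
        have hl := pvSetRangeA_length frag a n v
        unfold pvSetRangeA at hl
        rw [hl]
        by_cases hj : j < frag.length
        · rw [if_pos hj, List.getElem?_eq_getElem hj]
          simp
        · rw [if_neg hj, List.getElem?_eq_none (by omega : frag.length ≤ j)]
          simp
    · simp [h1]
      by_cases h2 : a ≤ j ∧ j < a + n
      · have : a ≤ j ∧ j < a + (n+1) := by omega
        simp [h2, this]
      · have : ¬(a ≤ j ∧ j < a + (n+1)) := by omega
        simp [h2, this]

-- B's slice assignment, pointwise
theorem sliceWrite_getElem? (frag : List (Option Int)) (a L : Nat) (v : Option Int)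
    (h : a + L ≤ frag.length) (j : Nat) :
    (frag.take a ++ List.replicate L v ++ frag.drop (a + L))[j]? =
      if a ≤ j ∧ j < a + L then some v else frag[j]? := by
  have hta : (frag.take a).length = a := by simp; omega
  rcases Nat.lt_or_ge j a with hj | hj
  · rw [List.getElem?_append_left (by simp [hta]; omega), List.getElem?_append_left (by omega)]
    rw [List.getElem?_take_of_lt hj]
    rw [if_neg (by omega)]
  · rcases Nat.lt_or_ge j (a + L) with hj2 | hj2
    · rw [List.getElem?_append_left (by simp [hta]; omega), List.getElem?_append_right (by omega)]
      rw [hta, if_pos (by omega)]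
      rw [List.getElem?_replicate]
      rw [if_pos (by omega)]
    · rw [List.getElem?_append_right (by simp [hta]; omega)]
      rw [if_neg (by omega)]
      simp only [List.length_append, hta, List.length_replicate, List.getElem?_drop]
      congr 1
      omega

theorem sliceWrite_length (frag : List (Option Int)) (a L : Nat) (v : Option Int)
    (h : a + L ≤ frag.length) :
    (frag.take a ++ List.replicate L v ++ frag.drop (a + L)).length = frag.length := by
  simp; omega

-- A's two range assignments produce exactly B's two slice assignments
theorem writeEq (frag : List (Option Int)) (fi : Int) (p fs L : Nat)
    (h1 : p + L ≤ fs) (h2 : fs + L ≤ frag.length) :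
    pvSetRangeA (pvSetRangeA frag fs L none) p L (some fi) =
      (frag.take fs ++ List.replicate L none ++ frag.drop (fs + L)).take p ++
        List.replicate L (some fi) ++
        (frag.take fs ++ List.replicate L none ++ frag.drop (fs + L)).drop (p + L) := by
  apply List.ext_getElem?
  intro j
  have hlen1 : (frag.take fs ++ List.replicate L none ++ frag.drop (fs + L)).length = frag.length :=
    sliceWrite_length frag fs L none h2
  rw [sliceWrite_getElem? (frag.take fs ++ List.replicate L none ++ frag.drop (fs + L)) p L (some fi) (by omega) j]
  rw [pvSetRangeA_getElem?, pvSetRangeA_getElem?]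
  rw [sliceWrite_getElem? frag fs L none h2 j]
  by_cases hp : p ≤ j ∧ j < p + L
  · rw [if_pos hp, if_pos hp]
    have hj : j < frag.length := by omega
    rw [List.getElem?_eq_getElem hj]
    split_ifs <;> simp
  · rw [if_neg hp, if_neg hp]
    by_cases hf : fs ≤ j ∧ j < fs + L
    · rw [if_pos hf, if_pos hf]
      have hj : j < frag.length := by omega
      rw [List.getElem?_eq_getElem hj]
      simp
    · rw [if_neg hf, if_neg hf]

-- A's inner while finds the maximal run of None cells starting at e
theorem pvInnerA_spec (frag : List (Option Int)) (e c : Nat) (he : frag[e]? = some none) :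
    e ≤ (pvInnerA frag e c).1 ∧
    (pvInnerA frag e c).2 = c + ((pvInnerA frag e c).1 - e) ∧
    (∀ k, e ≤ k → k ≤ (pvInnerA frag e c).1 → frag[k]? = some none) ∧
    ¬((pvInnerA frag e c).1 + 1 < frag.length ∧ frag[(pvInnerA frag e c).1 + 1]? = some none) := by
  rw [pvInnerA]
  split
  case isTrue h =>
    obtain ⟨ih1, ih2, ih3, ih4⟩ := pvInnerA_spec frag (e + 1) (c + 1) h.2
    refine ⟨by omega, by omega, ?_, ih4⟩
    intro k hk1 hk2
    rcases Nat.eq_or_lt_of_le hk1 with rfl | hk1'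
    · exact he
    · exact ih3 k (by omega) hk2
  case isFalse h =>
    exact ⟨le_refl _, by omega, fun k hk1 hk2 => by
      have : k = e := by omega
      rw [this]; exact he, h⟩
termination_by frag.length - e
decreasing_by omega

-- B's loop over a sufficient run of None cells hits the counter and writes at the run's start
theorem loopB_hit (frag : List (Option Int)) (fi : Int) (fs L : Nat) (i rc : Nat)
    (hrci : rc ≤ i) (hrcL : rc + 1 ≤ L) (hfit : i + (L - rc) ≤ fs)
    (hnone : ∀ k, k < L - rc → frag[i + k]? = some none) :
    pvLoopB frag fi fs L i rc =
      (frag.take fs ++ List.replicate L none ++ frag.drop (fs + L)).take (i - rc) ++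
        List.replicate L (some fi) ++
        (frag.take fs ++ List.replicate L none ++ frag.drop (fs + L)).drop ((i - rc) + L) := by
  rw [pvLoopB]
  have hi : i < fs := by omega
  rw [dif_pos hi]
  have h0 : frag[i]? = some none := by
    have := hnone 0 (by omega)
    simpa using this
  rw [if_pos h0]
  by_cases hL : rc + 1 = L
  · rw [if_pos hL]
    have e1 : i + 1 - L = i - rc := by omega
    rw [e1]
  · rw [if_neg hL]
    have := loopB_hit frag fi fs L (i + 1) (rc + 1) (by omega) (by omega) (by omega)
      (fun k hk => by
        have := hnone (k + 1) (by omega)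
        rw [show i + 1 + k = i + (k + 1) from by omega]
        exact this)
    rw [this, show i + 1 - (rc + 1) = i - rc from by omega]
termination_by L - rc
decreasing_by omega

-- B's loop walks across an insufficient run, accumulating the counter
theorem loopB_skip (frag : List (Option Int)) (fi : Int) (fs L : Nat) :
    ∀ (m i rc : Nat), i + m ≤ fs → rc + m < L → (∀ k, k < m → frag[i + k]? = some none) →
      pvLoopB frag fi fs L i rc = pvLoopB frag fi fs L (i + m) (rc + m) := by
  intro m
  induction m with
  | zero => intro i rc _ _ _; rfl
  | succ n ih =>
    intro i rc hm hL hnone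
    rw [pvLoopB, dif_pos (by omega : i < fs)]
    have h0 : frag[i]? = some none := by simpa using hnone 0 (by omega)
    rw [if_pos h0, if_neg (by omega : ¬ rc + 1 = L)]
    have := ih (i + 1) (rc + 1) (by omega) (by omega)
      (fun k hk => by rw [show i + 1 + k = i + (k + 1) from by omega]; exact hnone (k + 1) (by omega))
    rw [this, show i + 1 + n = i + (n + 1) from by omega, show rc + 1 + n = rc + (n + 1) from by omega]

-- at a cell that is not a free cell (or past the bound) the counter value is irrelevant
theorem loopB_rc_irrel (frag : List (Option Int)) (fi : Int) (fs L : Nat) (i rc rc' : Nat)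
    (h : ¬(i < fs ∧ frag[i]? = some none)) :
    pvLoopB frag fi fs L i rc = pvLoopB frag fi fs L i rc' := by
  by_cases hi : i < fs
  · have hn : ¬ frag[i]? = some none := fun hc => h ⟨hi, hc⟩
    conv_lhs => rw [pvLoopB]
    conv_rhs => rw [pvLoopB]
    rw [dif_pos hi, dif_pos hi, if_neg hn, if_neg hn]
  · conv_lhs => rw [pvLoopB]
    conv_rhs => rw [pvLoopB]
    rw [dif_neg hi, dif_neg hi]

-- the first occurrence index plus the total count never exceeds the length
theorem index_count_le (frag : List (Option Int)) (v : Option Int) (fs : Nat)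
    (hfs : PySem.List.index? frag v = some fs) :
    fs + PySem.List.count frag v ≤ frag.length := by
  obtain ⟨pre, suf, hsplit, hlen, hnot⟩ := (PySem.List.index?_eq_some_iff _ _ _).mp hfs
  subst hsplit
  rw [PySem.List.count_eq]
  have h1 : pre.count v = 0 := List.count_eq_zero.mpr hnot
  have h2 : suf.count v ≤ suf.length := List.count_le_length
  simp [List.count_append, h1]
  omega

-- main equivalence of the two loops, by induction on file_start - p
theorem outerA_eq_loopB (frag : List (Option Int)) (fi : Int) (fs L : Nat)
    (hfs : frag[fs]? = some (some fi)) (hL : 1 ≤ L) (hfsL : fs + L ≤ frag.length)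
    (p : Nat) (hp : p ≤ fs) :
    pvOuterA frag fi fs L p = pvLoopB frag fi fs L p 0 := by
  have hfslen : fs < frag.length := by
    by_contra h
    rw [List.getElem?_eq_none (by omega : frag.length ≤ fs)] at hfs
    exact absurd hfs (by simp)
  rw [pvOuterA]
  by_cases hpfs : p < fs
  · have hplen : p < frag.length := by omega
    rw [dif_pos ⟨hplen, hpfs⟩]
    by_cases hn : frag[p]? = some none
    · rw [if_pos hn]
      obtain ⟨he1, he2, he3, he4⟩ := pvInnerA_spec frag p 1 hn
      have hefs : (pvInnerA frag p 1).1 < fs := by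
        by_contra h
        have := he3 fs (by omega) (by omega)
        rw [hfs] at this
        exact absurd this (by simp)
      by_cases hcl : L ≤ (pvInnerA frag p 1).2
      · rw [if_pos hcl]
        rw [loopB_hit frag fi fs L p 0 (by omega) (by omega) (by omega)
          (fun k hk => he3 (p + k) (by omega) (by omega))]
        rw [writeEq frag fi p fs L (by omega) hfsL]
        rw [show p - 0 = p from by omega]
      · rw [if_neg hcl]
        rw [outerA_eq_loopB frag fi fs L hfs hL hfsL ((pvInnerA frag p 1).1 + 1) (by omega)]
        have hskip := loopB_skip frag fi fs L ((pvInnerA frag p 1).1 + 1 - p) p 0 (by omega) (by omega)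
          (fun k hk => he3 (p + k) (by omega) (by omega))
        rw [show p + ((pvInnerA frag p 1).1 + 1 - p) = (pvInnerA frag p 1).1 + 1 from by omega] at hskip
        rw [hskip]
        apply loopB_rc_irrel
        rintro ⟨h1, h2⟩
        exact he4 ⟨by omega, h2⟩
    · rw [if_neg hn]
      rw [outerA_eq_loopB frag fi fs L hfs hL hfsL (p + 1) (by omega)]
      have : pvLoopB frag fi fs L p 0 = pvLoopB frag fi fs L (p + 1) 0 := by
        rw [pvLoopB, dif_pos hpfs, if_neg hn]
      rw [this]
  · rw [dif_neg (by omega)]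
    rw [pvLoopB, dif_neg (by omega)]
termination_by fs - p
decreasing_by
  · omega
  · omega

-- ===== VERDICT (by name: the statement is the Claim_ definition above) =====
theorem move_file_index_spec : Claim_equal_move_file_index := by
  unfold Claim_equal_move_file_index
  intro frag fi _ hpre
  unfold Spec_move_file_index
  have hmem : (some fi) ∈ frag := hpre
  have hs : (PySem.List.index? frag (some fi)).isSome := (PySem.List.index?_isSome_iff _ _).mpr hmem
  obtain ⟨fs, hfs⟩ := Option.isSome_iff_exists.mp hs
  simp only [move_file_index, move_file_index_alt, hfs]
  obtain ⟨hk, hget, -⟩ := PySem.List.getElem_of_index?_eq_some hfs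
  have hL1 : 1 ≤ PySem.List.count frag (some fi) := by
    rw [PySem.List.count_eq]
    exact List.count_pos_iff.mpr hmem
  have hlen := index_count_le frag (some fi) fs hfs
  exact outerA_eq_loopB frag fi fs _ (by rw [List.getElem?_eq_getElem hk, hget]) hL1 hlen 0 (by omega)
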